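-- pv_equiv track=rewrite | github.com/NotSmartLeague/Esercizi-Domjudge-Primo-Anno | Exercises/Lab2.py | controlla
-- ===== SOURCE A (Python) =====
-- def controlla_distinti(numeratore, denominatore, lista):
--     frazione = [numeratore, denominatore]
--     for i in lista:
--         if i[0] == frazione[0] and i[1] == frazione[1]:
--             return False
--     return True
--
-- def controlla(lista1, lista2, n):
--     ripetuti = []
--     cont = 0
--     for numeratore in lista1:
--         for denominatore in lista2:
--             if numeratore % denominatore == 0 and controlla_distinti(numeratore, denominatore, ripetuti):
--                 cont += 1
--             ripetuti.append([numeratore, denominatore])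
--     return cont == n
-- ===== SOURCE B (Python) =====
-- def controlla(lista1, lista2, n):
--     # Deduplicate both lists up front (first occurrences), then one clean
--     # nested count of divisible pairs -- no seen-pairs accumulator.
--     num = list(dict.fromkeys(lista1))
--     den = list(dict.fromkeys(lista2))
--     cont = sum(1 for a in num for b in den if a % b == 0)
--     return cont == n
-- ===== Notes on version B (the rewrite author's own statement) =====
-- stated objective: faster
-- what changed: Drops the controlla_distinti helper and the ever-growing ripetuti list of seen pairs; instead both inputs are deduplicated once up front and a single nested generator counts divisible pairs.
import Mathlib
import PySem

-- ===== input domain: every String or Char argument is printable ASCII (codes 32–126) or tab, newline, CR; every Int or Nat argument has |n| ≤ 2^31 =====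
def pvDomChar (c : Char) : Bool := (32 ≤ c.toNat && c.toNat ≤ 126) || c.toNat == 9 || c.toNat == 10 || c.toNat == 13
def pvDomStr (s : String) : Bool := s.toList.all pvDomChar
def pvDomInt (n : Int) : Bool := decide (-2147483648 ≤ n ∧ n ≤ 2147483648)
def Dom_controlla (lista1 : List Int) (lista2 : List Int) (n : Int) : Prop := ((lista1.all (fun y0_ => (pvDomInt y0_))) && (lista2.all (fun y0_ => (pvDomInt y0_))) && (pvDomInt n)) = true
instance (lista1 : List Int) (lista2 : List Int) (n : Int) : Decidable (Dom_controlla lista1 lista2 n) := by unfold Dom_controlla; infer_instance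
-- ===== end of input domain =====

-- B drops A's seen-pairs accumulator: it deduplicates both inputs once and counts
-- divisible pairs with one clean nested scan (measured much faster: no quadratic pair list).

-- ===== PORT A =====
-- frazione := [numeratore, denominatore]; i[0]/i[1] ported via pyGet? (elements in
-- ripetuti are always 2-lists, so pyGet? is some _ exactly as Python returns a value)
def controlla_distinti (numeratore : Int) (denominatore : Int) (lista : List (List Int)) : Bool :=
  match lista with
  | [] => true
  | i :: rest =>
    if PySem.List.pyGet? i 0 = PySem.List.pyGet? [numeratore, denominatore] 0
       ∧ PySem.List.pyGet? i 1 = PySem.List.pyGet? [numeratore, denominatore] 1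
    then false
    else controlla_distinti numeratore denominatore rest

def controlla (lista1 : List Int) (lista2 : List Int) (n : Int) : Bool :=
  let st := lista1.foldl (fun (st : List (List Int) × Int) numeratore =>
    lista2.foldl (fun (st : List (List Int) × Int) denominatore =>
      let st1 :=
        if PySem.Int.mod numeratore denominatore = 0 ∧
           controlla_distinti numeratore denominatore st.1 = true
        then (st.1, st.2 + 1) else st
      (st1.1 ++ [[numeratore, denominatore]], st1.2)) st) (([] : List (List Int)), (0 : Int))
  decide (st.2 = n)

-- ===== PORT B =====
def controlla_alt (lista1 : List Int) (lista2 : List Int) (n : Int) : Bool :=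
  let num := PySem.List.dedup lista1
  let den := PySem.List.dedup lista2
  let cont : Int :=
    (num.map (fun a => ((den.countP (fun b => decide (PySem.Int.mod a b = 0))) : Int))).sum
  decide (cont = n)

-- ===== PRECONDITION & SPEC =====
-- Pre_ excludes exactly the inputs where Python A raises ZeroDivisionError
-- (some numerator is taken modulo a 0 in lista2); B raises there too.
def Pre_controlla (lista1 : List Int) (lista2 : List Int) (n : Int) : Prop :=
  lista1 = [] ∨ ¬ (0 : Int) ∈ lista2
instance (lista1 : List Int) (lista2 : List Int) (n : Int) : Decidable (Pre_controlla lista1 lista2 n) := by unfold Pre_controlla; infer_instance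
def pvWitness_controlla : List Int × List Int × Int := ([6], [2, 3], 2)

def Spec_controlla (lista1 : List Int) (lista2 : List Int) (n : Int) (out : Bool) : Prop := out = controlla_alt lista1 lista2 n
instance (lista1 : List Int) (lista2 : List Int) (n : Int) (out : Bool) : Decidable (Spec_controlla lista1 lista2 n out) := by unfold Spec_controlla; infer_instance

-- ===== CLAIM (what is proved, stated in full; the proofs are below) =====
def Claim_equal_controlla : Prop := ∀ (lista1 : List Int) (lista2 : List Int) (n : Int), Dom_controlla lista1 lista2 n → Pre_controlla lista1 lista2 n → Spec_controlla lista1 lista2 n (controlla lista1 lista2 n)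

-- ===== LEMMAS AND PROOFS =====

theorem pvGet0 (x y : Int) : PySem.List.pyGet? [x, y] 0 = some x := rfl
theorem pvGet1 (x y : Int) : PySem.List.pyGet? [x, y] 1 = some y := rfl

-- all pairs [a, b] appended by A while scanning numerators p against lista2
def pvPairs (p : List Int) (l2 : List Int) : List (List Int) :=
  p.flatMap (fun a => l2.map (fun b => [a, b]))

-- first occurrences of l not already in seen (A's "not yet counted" elements)
def pvDedupFrom (seen : List Int) (l : List Int) : List Int :=
  match l with
  | [] => []
  | b :: t => if b ∈ seen then pvDedupFrom seen t else b :: pvDedupFrom (seen ++ [b]) t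

theorem mem_pvDedupFrom (l : List Int) : ∀ (seen : List Int) (x : Int),
    x ∈ pvDedupFrom seen l ↔ x ∈ l ∧ x ∉ seen := by
  induction l with
  | nil => simp [pvDedupFrom]
  | cons b t ih =>
    intro seen x
    by_cases hb : b ∈ seen
    · rw [pvDedupFrom, if_pos hb, ih]
      constructor
      · rintro ⟨h1, h2⟩; exact ⟨List.mem_cons_of_mem _ h1, h2⟩
      · rintro ⟨h1, h2⟩
        rcases List.mem_cons.mp h1 with h | h
        · exact absurd (h ▸ hb) h2
        · exact ⟨h, h2⟩
    · rw [pvDedupFrom, if_neg hb]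
      constructor
      · intro h
        rcases List.mem_cons.mp h with h | h
        · exact ⟨List.mem_cons.mpr (Or.inl h), h ▸ hb⟩
        · have := (ih _ x).mp h
          simp only [List.mem_append, List.mem_singleton] at this
          exact ⟨List.mem_cons.mpr (Or.inr this.1), fun hx => this.2 (Or.inl hx)⟩
      · rintro ⟨h1, h2⟩
        rcases List.mem_cons.mp h1 with h | h
        · exact List.mem_cons.mpr (Or.inl h)
        · by_cases hx : x = b
          · exact List.mem_cons.mpr (Or.inl hx)
          · refine List.mem_cons.mpr (Or.inr ((ih _ x).mpr ⟨h, ?_⟩))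
            simp only [List.mem_append, List.mem_singleton]
            rintro (hh | hh)
            · exact h2 hh
            · exact hx hh

theorem nodup_pvDedupFrom (l : List Int) : ∀ (seen : List Int),
    (pvDedupFrom seen l).Nodup := by
  induction l with
  | nil => intro seen; simp [pvDedupFrom]
  | cons b t ih =>
    intro seen
    by_cases hb : b ∈ seen
    · rw [pvDedupFrom, if_pos hb]; exact ih seen
    · rw [pvDedupFrom, if_neg hb]
      refine List.nodup_cons.mpr ⟨fun h => ?_, ih _⟩
      have := (mem_pvDedupFrom t (seen ++ [b]) b).mp h
      simp at this

theorem pvDedupFrom_congr (l : List Int) : ∀ (s s' : List Int),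
    (∀ x, x ∈ s ↔ x ∈ s') → pvDedupFrom s l = pvDedupFrom s' l := by
  induction l with
  | nil => intro _ _ _; rfl
  | cons b t ih =>
    intro s s' h
    by_cases hb : b ∈ s
    · rw [pvDedupFrom, if_pos hb, pvDedupFrom, if_pos ((h b).mp hb)]
      exact ih s s' h
    · have hb' : b ∉ s' := fun hh => hb ((h b).mpr hh)
      rw [pvDedupFrom, if_neg hb, pvDedupFrom, if_neg hb']
      congr 1
      exact ih _ _ (by intro x; simp [h x])

theorem pvDedupFrom_perm_dedup (l : List Int) :
    (pvDedupFrom [] l).Perm (PySem.List.dedup l) := by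
  rw [List.perm_ext_iff_of_nodup (nodup_pvDedupFrom l []) (PySem.List.nodup_dedup l)]
  intro x
  simp [mem_pvDedupFrom]

theorem distinti_append (a b : Int) (R S : List (List Int)) :
    controlla_distinti a b (R ++ S) =
      (controlla_distinti a b R && controlla_distinti a b S) := by
  induction R with
  | nil => simp [controlla_distinti]
  | cons i rest ih => by_cases h : PySem.List.pyGet? i 0 = PySem.List.pyGet? [a, b] 0
      ∧ PySem.List.pyGet? i 1 = PySem.List.pyGet? [a, b] 1 <;>
    simp [controlla_distinti, h, ih, Bool.and_assoc]

theorem distinti_row (a b a' : Int) (l2 : List Int) :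
    controlla_distinti a b (l2.map (fun b' => [a', b'])) =
      !(decide (a' = a) && decide (b ∈ l2)) := by
  induction l2 with
  | nil => simp [controlla_distinti]
  | cons c t ih =>
    simp only [List.map_cons, controlla_distinti, pvGet0, pvGet1, Option.some.injEq, ih,
      List.mem_cons]
    have hcb : (b = c) ↔ (c = b) := eq_comm
    by_cases h1 : a' = a <;> by_cases h2 : c = b <;>
      simp [h1, h2, hcb]

theorem distinti_pairs (a b : Int) (p L2 : List Int) :
    controlla_distinti a b (pvPairs p L2) =
      !(decide (a ∈ p) && decide (b ∈ L2)) := by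
  induction p with
  | nil => simp [pvPairs, controlla_distinti]
  | cons a' rest ih =>
    have hx : pvPairs (a' :: rest) L2 = (L2.map (fun b' => [a', b'])) ++ pvPairs rest L2 := by
      simp [pvPairs]
    rw [hx, distinti_append, distinti_row, ih]
    have haa : (a = a') ↔ (a' = a) := eq_comm
    by_cases h1 : a' = a <;> by_cases h2 : b ∈ L2 <;> by_cases h3 : a ∈ rest <;>
      simp [h1, h2, h3, haa]

theorem inner_spec (a : Int) (p L2 : List Int) (rem : List Int) :
    ∀ (done : List Int) (c : Int), (∀ b ∈ rem, b ∈ L2) →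
    rem.foldl (fun (st : List (List Int) × Int) denominatore =>
      let st1 :=
        if PySem.Int.mod a denominatore = 0 ∧
           controlla_distinti a denominatore st.1 = true
        then (st.1, st.2 + 1) else st
      (st1.1 ++ [[a, denominatore]], st1.2))
      (pvPairs p L2 ++ done.map (fun b => [a, b]), c)
    = (pvPairs p L2 ++ (done ++ rem).map (fun b => [a, b]),
       c + if a ∈ p then 0
           else ((pvDedupFrom done rem).countP (fun b => decide (PySem.Int.mod a b = 0)) : Int)) := by
  induction rem with
  | nil => intro done c _; simp [pvDedupFrom]
  | cons b rem' ih =>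
    intro done c hsub
    have hbL2 : b ∈ L2 := hsub b (by simp)
    have hdist : controlla_distinti a b (pvPairs p L2 ++ done.map (fun b' => [a, b'])) =
        (!decide (a ∈ p) && !decide (b ∈ done)) := by
      rw [distinti_append, distinti_pairs, distinti_row]
      simp [hbL2]
    have hsub' : ∀ x ∈ rem', x ∈ L2 := fun x hx => hsub x (by simp [hx])
    have happ : (pvPairs p L2 ++ List.map (fun b' => [a, b']) done) ++ [[a, b]]
        = pvPairs p L2 ++ List.map (fun b' => [a, b']) (done ++ [b]) := by
      simp
    simp only [List.foldl_cons]
    by_cases hap : a ∈ p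
    · have hcond : ¬ (PySem.Int.mod a b = 0 ∧
          controlla_distinti a b (pvPairs p L2 ++ done.map (fun b' => [a, b'])) = true) := by
        rw [hdist]; simp [hap]
      rw [if_neg hcond, happ, ih (done ++ [b]) c hsub']
      simp [hap, List.append_assoc]
    · by_cases hbd : b ∈ done
      · have hcond : ¬ (PySem.Int.mod a b = 0 ∧
            controlla_distinti a b (pvPairs p L2 ++ done.map (fun b' => [a, b'])) = true) := by
          rw [hdist]; simp [hbd]
        have hcg : pvDedupFrom (done ++ [b]) rem' = pvDedupFrom done rem' := by
          refine pvDedupFrom_congr rem' _ _ ?_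
          intro x
          simp only [List.mem_append, List.mem_singleton]
          constructor
          · rintro (h | h)
            · exact h
            · exact h ▸ hbd
          · exact Or.inl
        rw [if_neg hcond, happ, ih (done ++ [b]) c hsub']
        simp [hap, hbd, hcg, pvDedupFrom, List.append_assoc]
      · by_cases hm : PySem.Int.mod a b = 0
        · have hcond : (PySem.Int.mod a b = 0 ∧
              controlla_distinti a b (pvPairs p L2 ++ done.map (fun b' => [a, b'])) = true) := by
            rw [hdist]; simp [hap, hbd, hm]
          rw [if_pos hcond, happ, ih (done ++ [b]) (c + 1) hsub']
          simp only [hap, hbd, pvDedupFrom, List.countP_cons, hm,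
            decide_true, List.append_assoc, List.singleton_append, if_false, Prod.mk.injEq]
          constructor
          · trivial
          · push_cast
            ring
        · have hcond : ¬ (PySem.Int.mod a b = 0 ∧
              controlla_distinti a b (pvPairs p L2 ++ done.map (fun b' => [a, b'])) = true) := by
            intro h; exact hm h.1
          rw [if_neg hcond, happ, ih (done ++ [b]) c hsub']
          simp [hap, hbd, hm, pvDedupFrom, List.append_assoc]

theorem outer_spec (L2 : List Int) (rem : List Int) :
    ∀ (p : List Int) (c : Int),
    rem.foldl (fun (st : List (List Int) × Int) numeratore =>
      L2.foldl (fun (st : List (List Int) × Int) denominatore =>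
        let st1 :=
          if PySem.Int.mod numeratore denominatore = 0 ∧
             controlla_distinti numeratore denominatore st.1 = true
          then (st.1, st.2 + 1) else st
        (st1.1 ++ [[numeratore, denominatore]], st1.2)) st)
      (pvPairs p L2, c)
    = (pvPairs (p ++ rem) L2,
       c + ((pvDedupFrom p rem).map (fun a =>
         ((pvDedupFrom [] L2).countP (fun b => decide (PySem.Int.mod a b = 0)) : Int))).sum) := by
  induction rem with
  | nil => intro p c; simp [pvDedupFrom]
  | cons a rem' ih =>
    intro p c
    simp only [List.foldl_cons]
    have hstep := inner_spec a p L2 L2 [] c (fun _ h => h)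
    simp only [List.nil_append, List.map_nil, List.append_nil] at hstep
    rw [hstep]
    have hpairs : pvPairs p L2 ++ L2.map (fun b => [a, b]) = pvPairs (p ++ [a]) L2 := by
      simp [pvPairs]
    rw [hpairs, ih (p ++ [a])]
    by_cases hap : a ∈ p
    · have hcg : pvDedupFrom (p ++ [a]) rem' = pvDedupFrom p rem' := by
        refine pvDedupFrom_congr rem' _ _ ?_
        intro x
        simp only [List.mem_append, List.mem_singleton]
        constructor
        · rintro (h | h)
          · exact h
          · exact h ▸ hap
        · exact Or.inl
      simp [pvDedupFrom, hap, hcg, List.append_assoc]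
    · simp [pvDedupFrom, hap, add_assoc, List.append_assoc]

theorem controlla_eq (lista1 lista2 : List Int) (n : Int) :
    controlla lista1 lista2 n = controlla_alt lista1 lista2 n := by
  have hperm1 := pvDedupFrom_perm_dedup lista1
  have hperm2 := pvDedupFrom_perm_dedup lista2
  have hA := outer_spec lista2 lista1 [] 0
  simp only [pvPairs, List.flatMap_nil, List.nil_append, zero_add] at hA
  unfold controlla controlla_alt
  simp only [hA]
  have hfun : ∀ a : Int,
      ((pvDedupFrom [] lista2).countP (fun b => decide (PySem.Int.mod a b = 0)) : Int)
      = ((PySem.List.dedup lista2).countP (fun b => decide (PySem.Int.mod a b = 0)) : Int) := by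
    intro a
    rw [hperm2.countP_eq]
  have hsum : ((pvDedupFrom [] lista1).map (fun a =>
      ((pvDedupFrom [] lista2).countP (fun b => decide (PySem.Int.mod a b = 0)) : Int))).sum
      = ((PySem.List.dedup lista1).map (fun a =>
      ((PySem.List.dedup lista2).countP (fun b => decide (PySem.Int.mod a b = 0)) : Int))).sum := by
    calc ((pvDedupFrom [] lista1).map (fun a =>
        ((pvDedupFrom [] lista2).countP (fun b => decide (PySem.Int.mod a b = 0)) : Int))).sum
        = ((pvDedupFrom [] lista1).map (fun a =>
        ((PySem.List.dedup lista2).countP (fun b => decide (PySem.Int.mod a b = 0)) : Int))).sum := by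
          simp only [hfun]
      _ = _ := (hperm1.map _).sum_eq
  rw [hsum]

-- ===== VERDICT (by name: the statement is the Claim_ definition above) =====
theorem controlla_spec : Claim_equal_controlla := by
  intro lista1 lista2 n _ _
  unfold Spec_controlla
  exact controlla_eq lista1 lista2 n
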